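-- pv_equiv track=rewrite | github.com/ikhsansdqq/tes-server-web | req_handle.py | handle_request
-- ===== SOURCE A (Python) =====
-- def generate_html(name, birth):
--     html = """
--     <!DOCTYPE html>
--     <html>
--     <head>
--         <title>Dynamic HTML</title>
--     </head>
--     <body>
--         <h1>Welcome</h1>
--         <p>Name: {name}</p>
--         <p>Birth: {birth}</p>
--     </body>
--     </html>
--     """
--     return html.format(name=name, birth=birth)
--
-- def handle_request(request, theName, theBirth):
--     # Extract the data from the request
--     data = request.split('\r\n\r\n')[-1]  # Assuming the form data is in the body of the request
--
--     # Extract the values from the form data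
--     name = theName
--     birth = theBirth
--     for item in data.split('&'):
--         if '=' in item:
--             key, value = item.split('=')
--             if key == 'NAME':
--                 name = value
--             elif key == 'BIRTH':
--                 birth = value
--
--     # Generate the dynamic HTML
--     html_content = generate_html(name, birth)
--
--     # Create the HTTP response with the dynamic HTML
--     response = "HTTP/1.1 200 OK\r\n"
--     response += "Content-type: text/html\r\n\r\n"
--     response += html_content
--
--     return response
-- ===== SOURCE B (Python) =====
-- def generate_html(name, birth):
--     html = """
--     <!DOCTYPE html>
--     <html>
--     <head>
--         <title>Dynamic HTML</title>
--     </head>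
--     <body>
--         <h1>Welcome</h1>
--         <p>Name: {name}</p>
--         <p>Birth: {birth}</p>
--     </body>
--     </html>
--     """
--     return html.format(name=name, birth=birth)
--
-- def _last_value(items, key, default):
--     # Last assignment wins in A, so search backwards for the first match.
--     for item in reversed(items):
--         parts = item.split('=')
--         if len(parts) == 2 and parts[0] == key:
--             return parts[1]
--     return default
--
-- def handle_request(request, theName, theBirth):
--     body = request.split('\r\n\r\n')[-1]
--     items = body.split('&')
--     name = _last_value(items, 'NAME', theName)
--     birth = _last_value(items, 'BIRTH', theBirth)
--     response = "HTTP/1.1 200 OK\r\n"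
--     response += "Content-type: text/html\r\n\r\n"
--     response += generate_html(name, birth)
--     return response
-- ===== Notes on version B (the rewrite author's own statement) =====
-- stated objective: alternative
-- what changed: handle_request replaces A's single forward fold that threads a (name, birth) accumulator through every item with two independent backward searches over the split items, each returning the value of the last well-formed assignment to its key (last-wins semantics).
import Mathlib
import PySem

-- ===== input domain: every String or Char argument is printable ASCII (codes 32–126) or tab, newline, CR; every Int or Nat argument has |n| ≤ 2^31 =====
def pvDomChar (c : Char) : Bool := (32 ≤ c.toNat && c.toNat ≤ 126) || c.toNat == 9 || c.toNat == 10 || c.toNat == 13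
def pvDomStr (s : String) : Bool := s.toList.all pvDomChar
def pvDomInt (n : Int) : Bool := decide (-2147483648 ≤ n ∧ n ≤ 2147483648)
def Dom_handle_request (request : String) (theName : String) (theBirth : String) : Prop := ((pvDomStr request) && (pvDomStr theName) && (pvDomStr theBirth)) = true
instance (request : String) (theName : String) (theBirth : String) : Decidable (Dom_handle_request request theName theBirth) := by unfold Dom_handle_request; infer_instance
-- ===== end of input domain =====

-- B replaces A's forward fold with a (name,birth) accumulator by two independent backward searches for the last assignment to each key (alternative decomposition); same return value on Pre_.


-- ===== PORT A =====
def generate_html (name : String) (birth : String) : String :=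
  "\n    <!DOCTYPE html>\n    <html>\n    <head>\n        <title>Dynamic HTML</title>\n    </head>\n    <body>\n        <h1>Welcome</h1>\n        <p>Name: " ++ name ++ "</p>\n        <p>Birth: " ++ birth ++ "</p>\n    </body>\n    </html>\n    "

-- split? never returns none here (both separators are non-empty literals), so .getD [] is exact.
def handle_request (request : String) (theName : String) (theBirth : String) : String :=
  let data := ((PySem.Str.split? request "\r\n\r\n").getD []).getLastD ""  -- [-1] of a split result (always nonempty)
  let nb := ((PySem.Str.split? data "&").getD []).foldl (fun (nb : String × String) item =>
    if PySem.Str.isIn "=" item then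
      match PySem.Str.split? item "=" with
      | some [key, value] =>
          if key == "NAME" then (value, nb.2)
          else if key == "BIRTH" then (nb.1, value)
          else nb
      | _ => nb  -- ValueError in Python (multi-'=' item); excluded by Pre_
    else nb) (theName, theBirth)
  let html_content := generate_html nb.1 nb.2
  "HTTP/1.1 200 OK\r\n" ++ "Content-type: text/html\r\n\r\n" ++ html_content

-- ===== PORT B =====
def generate_html_alt (name : String) (birth : String) : String :=
  "\n    <!DOCTYPE html>\n    <html>\n    <head>\n        <title>Dynamic HTML</title>\n    </head>\n    <body>\n        <h1>Welcome</h1>\n        <p>Name: " ++ name ++ "</p>\n        <p>Birth: " ++ birth ++ "</p>\n    </body>\n    </html>\n    "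

-- _last_value's loop over reversed(items): structural recursion over items.reverse.
-- '=' is non-empty, so item.split('=') never fails and .getD [] is exact.
def last_value : List String → String → String → String
  | [], _, default => default
  | item :: rest, key, default =>
    let parts := (PySem.Str.split? item "=").getD []
    if parts.length = 2 ∧ parts[0]! = key then parts[1]!
    else last_value rest key default

def handle_request_alt (request : String) (theName : String) (theBirth : String) : String :=
  let body := ((PySem.Str.split? request "\r\n\r\n").getD []).getLastD ""  -- [-1] of a split result (always nonempty)
  let items := (PySem.Str.split? body "&").getD []
  let name := last_value items.reverse "NAME" theName
  let birth := last_value items.reverse "BIRTH" theBirth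
  "HTTP/1.1 200 OK\r\n" ++ "Content-type: text/html\r\n\r\n" ++ generate_html_alt name birth

-- ===== PRECONDITION & SPEC =====
-- Pre_ excludes requests whose body has a form item containing more than one '=': there
-- `key, value = item.split('=')` raises ValueError in A (B just skips such items).
def Pre_handle_request (request : String) (theName : String) (theBirth : String) : Prop :=
  ∀ item ∈ (PySem.Str.split? (((PySem.Str.split? request "\r\n\r\n").getD []).getLastD "") "&").getD [],
    PySem.Str.isIn "=" item = true → ((PySem.Str.split? item "=").getD []).length = 2
instance (request : String) (theName : String) (theBirth : String) : Decidable (Pre_handle_request request theName theBirth) := by unfold Pre_handle_request; infer_instance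

def pvWitness_handle_request : String × String × String :=
  ("POST / HTTP/1.1\r\n\r\nNAME=Alice&BIRTH=1999", "nobody", "unknown")

def Spec_handle_request (request : String) (theName : String) (theBirth : String) (out : String) : Prop := out = handle_request_alt request theName theBirth
instance (request : String) (theName : String) (theBirth : String) (out : String) : Decidable (Spec_handle_request request theName theBirth out) := by unfold Spec_handle_request; infer_instance

-- ===== CLAIM (what is proved, stated in full; the proofs are below) =====
def Claim_equal_handle_request : Prop := ∀ (request : String) (theName : String) (theBirth : String), Dom_handle_request request theName theBirth → Pre_handle_request request theName theBirth → Spec_handle_request request theName theBirth (handle_request request theName theBirth)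

-- ===== LEMMAS AND PROOFS =====

-- splitOn.go never sees the separator: it just sweeps the characters into one piece.
theorem splitOn_go_no_occ (sep : List Char) (fuel : Nat) (l cur : List Char) (acc : List (List Char))
    (h : ¬ sep <:+: l) :
    PySem.Chars.splitOn.go sep fuel l cur acc = ((cur.reverse ++ l) :: acc).reverse := by
  induction fuel generalizing l cur with
  | zero => simp [PySem.Chars.splitOn.go]
  | succ fuel ih =>
    cases l with
    | nil => simp [PySem.Chars.splitOn.go]
    | cons c rest =>
      have hpre : sep.isPrefixOf (c :: rest) = false := by
        by_contra hc
        exact h (List.IsPrefix.isInfix (List.isPrefixOf_iff_prefix.mp (by simpa using hc)))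
      have hrest : ¬ sep <:+: rest := fun hinf => h (hinf.trans (List.suffix_cons c rest).isInfix)
      simp only [PySem.Chars.splitOn.go, hpre, Bool.false_eq_true, if_false]
      rw [ih _ _ hrest]
      simp

theorem splitOn_no_occ (l sep : List Char) (h : ¬ sep <:+: l) :
    PySem.Chars.splitOn l sep = [l] := by
  unfold PySem.Chars.splitOn
  rw [splitOn_go_no_occ _ _ _ _ _ h]
  simp

-- An item with no '=' splits into the single piece [item].
theorem split_eq_no_sep (s : String) (h : PySem.Str.isIn "=" s = false) :
    PySem.Str.split? s "=" = some [s] := by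
  have h' : ¬ ("=".toList) <:+: s.toList := by
    rw [PySem.Str.isIn] at h
    exact (PySem.Chars.isIn_eq_false_iff _ _).mp h
  simp only [PySem.Str.split?, PySem.Chars.split?]
  rw [splitOn_no_occ _ _ h']
  simp

-- Searching a concatenation = search the left part with the right part's result as default.
theorem last_value_append (xs ys : List String) (key d : String) :
    last_value (xs ++ ys) key d = last_value xs key (last_value ys key d) := by
  induction xs with
  | nil => simp [last_value]
  | cons x xs ih =>
    simp only [List.cons_append, last_value]
    rw [ih]

-- One step of the backward search on a literal split result.
theorem last_value_single_hit (item k v key d : String)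
    (hsp : PySem.Str.split? item "=" = some [k, v]) (hk : k = key) :
    last_value [item] key d = v := by
  simp only [last_value, hsp, Option.getD_some, List.length_cons, List.length_nil,
    List.getElem!_cons_zero]
  rw [if_pos ⟨by simp, hk⟩]
  simp

theorem last_value_single_miss (item k v key d : String)
    (hsp : PySem.Str.split? item "=" = some [k, v]) (hk : k ≠ key) :
    last_value [item] key d = d := by
  simp only [last_value, hsp, Option.getD_some, List.length_cons, List.length_nil,
    List.getElem!_cons_zero]
  rw [if_neg (fun hc => hk hc.2)]

theorem last_value_single_noeq (item key d : String)
    (hsp : PySem.Str.split? item "=" = some [item]) :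
    last_value [item] key d = d := by
  simp only [last_value, hsp, Option.getD_some]
  rw [if_neg]
  rintro ⟨h1, -⟩
  simp only [List.length_cons, List.length_nil] at h1
  omega

-- Loop correspondence: A's forward fold from (n0, b0) equals B's backward searches with defaults n0, b0.
theorem fold_eq_last_value (items : List String) (n0 b0 : String)
    (h : ∀ item ∈ items, PySem.Str.isIn "=" item = true → ((PySem.Str.split? item "=").getD []).length = 2) :
    items.foldl (fun (nb : String × String) item =>
      if PySem.Str.isIn "=" item then
        match PySem.Str.split? item "=" with
        | some [key, value] =>
            if key == "NAME" then (value, nb.2)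
            else if key == "BIRTH" then (nb.1, value)
            else nb
        | _ => nb
      else nb) (n0, b0)
    = (last_value items.reverse "NAME" n0, last_value items.reverse "BIRTH" b0) := by
  induction items generalizing n0 b0 with
  | nil => simp [last_value]
  | cons item rest ih =>
    have hrest : ∀ it ∈ rest, PySem.Str.isIn "=" it = true → ((PySem.Str.split? it "=").getD []).length = 2 :=
      fun it hit => h it (List.mem_cons_of_mem _ hit)
    simp only [List.foldl_cons, List.reverse_cons, last_value_append]
    by_cases hin : PySem.Str.isIn "=" item = true
    · have hl := h item List.mem_cons_self hin
      match hsp : PySem.Str.split? item "=" with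
      | none => simp [hsp] at hl
      | some [] => simp [hsp] at hl
      | some [k] => simp [hsp] at hl
      | some (a :: b :: c :: t) => simp [hsp] at hl
      | some [k, v] =>
        simp only [hin, if_true]
        by_cases hk : k = "NAME"
        · subst hk
          rw [last_value_single_hit item _ v "NAME" n0 hsp rfl,
              last_value_single_miss item _ v "BIRTH" b0 hsp (by decide)]
          rw [show (("NAME" : String) == "NAME") = true from by decide]
          simp only [if_true]
          exact ih v b0 hrest
        · by_cases hk2 : k = "BIRTH"
          · subst hk2
            rw [last_value_single_miss item _ v "NAME" n0 hsp (by decide),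
                last_value_single_hit item _ v "BIRTH" b0 hsp rfl]
            rw [show (("BIRTH" : String) == "NAME") = false from by decide,
                show (("BIRTH" : String) == "BIRTH") = true from by decide]
            simp only [Bool.false_eq_true, if_false, if_true]
            exact ih n0 v hrest
          · rw [last_value_single_miss item _ v "NAME" n0 hsp hk,
                last_value_single_miss item _ v "BIRTH" b0 hsp hk2]
            have hb1 : (k == "NAME") = false := by simpa using hk
            have hb2 : (k == "BIRTH") = false := by simpa using hk2
            simp only [hb1, hb2, Bool.false_eq_true, if_false]
            exact ih n0 b0 hrest
    · have hin' : PySem.Str.isIn "=" item = false := by simpa using hin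
      have hsp := split_eq_no_sep item hin'
      rw [last_value_single_noeq item "NAME" n0 hsp,
          last_value_single_noeq item "BIRTH" b0 hsp]
      simp only [hin, Bool.false_eq_true, if_false]
      exact ih n0 b0 hrest

-- ===== VERDICT (by name: the statement is the Claim_ definition above) =====
theorem handle_request_spec : Claim_equal_handle_request := by
  intro request theName theBirth _hdom hpre
  unfold Spec_handle_request handle_request handle_request_alt
  simp only []
  rw [fold_eq_last_value _ _ _ hpre]
  rfl
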